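-- pv_equiv track=rewrite | github.com/aungsias/Eigen | __tinkering__/__junkyard__/vivian/game_funcs/utils/utils.py | print_message_ws
-- ===== SOURCE A (Python) =====
-- def print_message_ws(m):
--     words = m.split()
--     for i in range(len(words)):
--         if i >= 13 and (i - 13) % 14 == 0:
--             words[i] += '\n'
--         else:
--             words[i] += ' '
--     words.append("\n\n")
--     return ''.join(words)
-- ===== SOURCE B (Python) =====
-- def print_message_ws(m):
--     words = m.split()
--     parts = []
--     for start in range(0, len(words), 14):
--         chunk = words[start:start + 14]
--         parts.append(' '.join(chunk) + ('\n' if len(chunk) == 14 else ' '))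
--     return ''.join(parts) + '\n\n'
-- ===== Notes on version B (the rewrite author's own statement) =====
-- stated objective: simpler
-- what changed: Replaces the per-index modular separator assignment over a mutated word list by a line-oriented pass that slices the word list into chunks of 14 and emits each space-joined chunk plus its trailing separator (newline for a full chunk, space otherwise).
import Mathlib
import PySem

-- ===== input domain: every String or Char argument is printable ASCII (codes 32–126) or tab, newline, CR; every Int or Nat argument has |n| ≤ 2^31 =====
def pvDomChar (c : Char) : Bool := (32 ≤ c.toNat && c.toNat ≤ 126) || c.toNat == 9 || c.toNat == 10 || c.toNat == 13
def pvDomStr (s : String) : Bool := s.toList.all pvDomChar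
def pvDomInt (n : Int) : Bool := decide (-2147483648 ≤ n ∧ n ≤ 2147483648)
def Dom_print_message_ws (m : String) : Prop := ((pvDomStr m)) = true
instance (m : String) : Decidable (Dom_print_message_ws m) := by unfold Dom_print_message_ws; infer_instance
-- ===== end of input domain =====

-- B replaces A's per-index modular separator assignment over a mutated word list by a
-- line-oriented pass over chunks of 14 words (simpler decomposition; same cost).


-- ===== PORT A =====
def print_message_ws (m : String) : String :=
  let words := PySem.Str.split₀ m
  let words :=
    (PySem.List.pyRange 0 (words.length : Int) 1).foldl
      (fun ws i =>
        if 13 ≤ i ∧ PySem.Int.mod (i - 13) 14 = 0 then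
          PySem.List.pySetD ws i (PySem.List.pyGetD ws i "" ++ "\n")
        else
          PySem.List.pySetD ws i (PySem.List.pyGetD ws i "" ++ " ")) words
  PySem.Str.join "" (words ++ ["\n\n"])

-- ===== PORT B =====
-- the 'for start in range(0, len(words), 14)' slicing loop of Source B, one chunk per step
def pvBChunks : List String → List String
  | [] => []
  | w :: t =>
    let chunk := w :: t.take 13
    (PySem.Str.join " " chunk ++ (if chunk.length = 14 then "\n" else " ")) :: pvBChunks (t.drop 13)
  termination_by l => l.length
  decreasing_by simp

def print_message_ws_alt (m : String) : String :=
  PySem.Str.join "" (pvBChunks (PySem.Str.split₀ m)) ++ "\n\n"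

-- ===== PRECONDITION & SPEC =====
def Spec_print_message_ws (m : String) (out : String) : Prop := out = print_message_ws_alt m
instance (m : String) (out : String) : Decidable (Spec_print_message_ws m out) := by unfold Spec_print_message_ws; infer_instance

-- ===== CLAIM (what is proved, stated in full; the proofs are below) =====
def Claim_equal_print_message_ws : Prop := ∀ (m : String), Dom_print_message_ws m → Spec_print_message_ws m (print_message_ws m)

-- ===== LEMMAS AND PROOFS =====

-- separator A attaches to the word at (0-based) position n
def pvSep (n : Nat) : String := if n % 14 = 13 then "\n" else " "

-- the word list after A's loop, starting from position k
def pvAmap (k : Nat) : List String → List String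
  | [] => []
  | w :: t => (w ++ pvSep k) :: pvAmap (k + 1) t

theorem pvSep_shift (k : Nat) : pvSep (k + 14) = pvSep k := by
  unfold pvSep
  have : (k + 14) % 14 = k % 14 := by omega
  rw [this]

theorem pvAmap_shift (l : List String) (k : Nat) : pvAmap (k + 14) l = pvAmap k l := by
  induction l generalizing k with
  | nil => rfl
  | cons w t ih =>
    simp only [pvAmap]
    rw [show k + 14 + 1 = (k + 1) + 14 by omega, ih, pvSep_shift]

theorem pvAmap_append (l₁ l₂ : List String) (k : Nat) :
    pvAmap k (l₁ ++ l₂) = pvAmap k l₁ ++ pvAmap (k + l₁.length) l₂ := by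
  induction l₁ generalizing k with
  | nil => simp [pvAmap]
  | cons w t ih =>
    simp only [List.cons_append, pvAmap, List.length_cons]
    rw [ih, show k + (t.length + 1) = k + 1 + t.length from by omega]

theorem pvJoinE_nil : PySem.Str.join "" [] = "" := by
  rw [← String.toList_inj]
  simp [PySem.Str.toList_join, PySem.Chars.join_nil]

theorem pvJoinE_cons (x : String) (l : List String) :
    PySem.Str.join "" (x :: l) = x ++ PySem.Str.join "" l := by
  rw [← String.toList_inj]
  cases l <;>
    simp [PySem.Str.toList_join, PySem.Chars.join_nil, PySem.Chars.join_singleton,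
      PySem.Chars.join_cons_cons]

theorem pvJoinE_append (l₁ l₂ : List String) :
    PySem.Str.join "" (l₁ ++ l₂) = PySem.Str.join "" l₁ ++ PySem.Str.join "" l₂ := by
  induction l₁ with
  | nil => simp [pvJoinE_nil]
  | cons x t ih => simp [pvJoinE_cons, ih, String.append_assoc]

theorem pvJoinSp_singleton (x : String) : PySem.Str.join " " [x] = x := by
  rw [← String.toList_inj]
  simp [PySem.Str.toList_join, PySem.Chars.join_singleton]

theorem pvJoinSp_cons_cons (x y : String) (t : List String) :
    PySem.Str.join " " (x :: y :: t) = x ++ " " ++ PySem.Str.join " " (y :: t) := by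
  rw [← String.toList_inj]
  simp [PySem.Str.toList_join, PySem.Chars.join_cons_cons]

-- A's separators over one chunk: all ' ' except a '\n' on the word closing position 13
theorem pvChunk (c : List String) (k : Nat) (hne : c ≠ []) (hle : k + c.length ≤ 14) :
    PySem.Str.join "" (pvAmap k c)
      = PySem.Str.join " " c ++ (if k + c.length = 14 then "\n" else " ") := by
  induction c generalizing k with
  | nil => exact absurd rfl hne
  | cons x t ih =>
    cases t with
    | nil =>
      simp only [pvAmap, pvJoinE_cons, pvJoinE_nil, String.append_empty]
      have : pvSep k = if k + [x].length = 14 then "\n" else " " := by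
        unfold pvSep
        simp only [List.length_cons, List.length_nil]
        split_ifs with h1 h2 h2 <;> first | rfl | (exfalso; omega)
      rw [this, pvJoinSp_singleton]
    | cons y t' =>
      have hk : k ≤ 12 := by simp at hle; omega
      have hs : pvSep k = " " := by unfold pvSep; rw [if_neg (by omega)]
      simp only [pvAmap, pvJoinE_cons] at *
      rw [hs, ih (k + 1) (by simp) (by simp at hle ⊢; omega)]
      rw [pvJoinSp_cons_cons, ← String.append_assoc]
      simp only [List.length_cons] at *
      congr 1
      split_ifs with h1 h2 h2 <;> first | rfl | (exfalso; omega)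

-- the chunked pass of B reproduces A's per-word separators
theorem pvMain (ws : List String) :
    PySem.Str.join "" (pvAmap 0 ws) = PySem.Str.join "" (pvBChunks ws) := by
  induction hn : ws.length using Nat.strong_induction_on generalizing ws with
  | _ n ih =>
    cases ws with
    | nil => simp [pvAmap, pvBChunks]
    | cons w t =>
      conv_rhs => rw [pvBChunks]
      set c : List String := w :: t.take 13 with hc
      have hsplit : w :: t = c ++ t.drop 13 := by simp [hc]
      have hclen : c.length ≤ 14 := by simp [hc]
      rw [hsplit, pvAmap_append, pvJoinE_append, pvJoinE_cons]
      rw [pvChunk c 0 (by simp [hc]) (by omega)]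
      simp only [Nat.zero_add]
      congr 1
      by_cases hd : t.length ≤ 13
      · rw [List.drop_eq_nil_of_le (by simpa using hd)]
        simp [pvAmap, pvJoinE_nil, pvBChunks]
      · have h14 : c.length = 14 := by simp [hc]; omega
        rw [h14, show (14 : Nat) = 0 + 14 by rfl, pvAmap_shift]
        exact ih (t.drop 13).length (by subst hn; simp) _ rfl

-- A's index loop over the word list rewrites word a.. in place; result from position a on
theorem pvLoop (ws : List String) (a : Nat) (h : a ≤ ws.length) :
    (PySem.List.pyRange (a : Int) (ws.length : Int) 1).foldl
      (fun ws i =>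
        if 13 ≤ i ∧ PySem.Int.mod (i - 13) 14 = 0 then
          PySem.List.pySetD ws i (PySem.List.pyGetD ws i "" ++ "\n")
        else
          PySem.List.pySetD ws i (PySem.List.pyGetD ws i "" ++ " ")) ws
    = ws.take a ++ pvAmap a (ws.drop a) := by
  induction hn : ws.length - a using Nat.strong_induction_on generalizing ws a with
  | _ n ih =>
    rcases Nat.eq_or_lt_of_le h with heq | hlt
    · rw [PySem.List.pyRange_one_eq_nil (by exact_mod_cast Nat.le_of_eq heq.symm)]
      rw [List.drop_eq_nil_of_le (Nat.le_of_eq heq.symm), List.take_of_length_le (Nat.le_of_eq heq.symm)]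
      simp [pvAmap]
    · rw [PySem.List.pyRange_one_cons (by exact_mod_cast hlt)]
      simp only [List.foldl_cons]
      have hcond : (13 ≤ (a : Int) ∧ PySem.Int.mod ((a : Int) - 13) 14 = 0) ↔ a % 14 = 13 := by
        rw [PySem.Int.mod_eq_emod_of_pos (by norm_num)]
        omega
      have hstep :
          (if 13 ≤ (a : Int) ∧ PySem.Int.mod ((a : Int) - 13) 14 = 0 then
            PySem.List.pySetD ws (a : Int) (PySem.List.pyGetD ws (a : Int) "" ++ "\n")
          else
            PySem.List.pySetD ws (a : Int) (PySem.List.pyGetD ws (a : Int) "" ++ " "))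
          = ws.set a (ws[a] ++ pvSep a) := by
        rw [PySem.List.pySetD_natCast, PySem.List.pySetD_natCast, PySem.List.pyGetD_natCast,
          List.getD_eq_getElem ws "" hlt]
        unfold pvSep
        by_cases hm : a % 14 = 13
        · rw [if_pos (hcond.mpr hm), if_pos hm]
        · rw [if_neg (fun hh => hm (hcond.mp hh)), if_neg hm]
      rw [hstep]
      have hlen : (ws.set a (ws[a] ++ pvSep a)).length = ws.length := by simp
      have := ih (ws.length - (a + 1)) (by omega) (ws.set a (ws[a] ++ pvSep a)) (a + 1)
        (by rw [hlen]; omega) (by rw [hlen])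
      rw [show ((a : Int) + 1) = ((a + 1 : Nat) : Int) by push_cast; ring, ← hlen, this]
      have htake : (ws.set a (ws[a] ++ pvSep a)).take (a + 1) = ws.take a ++ [ws[a] ++ pvSep a] := by
        rw [List.take_add_one, List.take_set, List.set_eq_of_length_le (by simp)]
        simp [hlt]
      have hdrop : (ws.set a (ws[a] ++ pvSep a)).drop (a + 1) = ws.drop (a + 1) := by
        rw [List.drop_set_of_lt (by omega)]
      rw [htake, hdrop]
      have hws : ws.drop a = ws[a] :: ws.drop (a + 1) := List.drop_eq_getElem_cons hlt
      rw [hws]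
      simp [pvAmap]

-- ===== VERDICT (by name: the statement is the Claim_ definition above) =====
theorem print_message_ws_spec : Claim_equal_print_message_ws := by
  intro m _
  simp only [Spec_print_message_ws, print_message_ws, print_message_ws_alt]
  set ws := PySem.Str.split₀ m
  have h0 := pvLoop ws 0 (Nat.zero_le _)
  simp only [Nat.cast_zero, List.take_zero, List.drop_zero, List.nil_append] at h0
  rw [h0, pvJoinE_append, pvMain, pvJoinE_cons, pvJoinE_nil, String.append_empty]
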